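-- pv_equiv track=rewrite | github.com/MaxiLargo/Python | Ejercicio.py | maximotuplas
-- ===== SOURCE A (Python) =====
-- def maximotuplas(listatuplas:list[tuple[str,int]],producto:str):
--     valormaximo:int = 0
--     for i,j in listatuplas:
--         if producto == i:
--                 valormaximo=j
--     for i,j in listatuplas:
--          if producto == i:
--               if j>valormaximo:
--                    valormaximo=j
--     return valormaximo
-- ===== SOURCE B (Python) =====
-- def maximotuplas(listatuplas: list[tuple[str, int]], producto: str):
--     vals = [j for i, j in listatuplas if i == producto]
--     return max(vals) if vals else 0
-- ===== Notes on version B (the rewrite author's own statement) =====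
-- stated objective: simpler
-- what changed: Replaces A's two sequential accumulator loops (last-match pass, then running-max pass) with a single filter comprehension feeding max() with an emptiness guard.
import Mathlib
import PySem

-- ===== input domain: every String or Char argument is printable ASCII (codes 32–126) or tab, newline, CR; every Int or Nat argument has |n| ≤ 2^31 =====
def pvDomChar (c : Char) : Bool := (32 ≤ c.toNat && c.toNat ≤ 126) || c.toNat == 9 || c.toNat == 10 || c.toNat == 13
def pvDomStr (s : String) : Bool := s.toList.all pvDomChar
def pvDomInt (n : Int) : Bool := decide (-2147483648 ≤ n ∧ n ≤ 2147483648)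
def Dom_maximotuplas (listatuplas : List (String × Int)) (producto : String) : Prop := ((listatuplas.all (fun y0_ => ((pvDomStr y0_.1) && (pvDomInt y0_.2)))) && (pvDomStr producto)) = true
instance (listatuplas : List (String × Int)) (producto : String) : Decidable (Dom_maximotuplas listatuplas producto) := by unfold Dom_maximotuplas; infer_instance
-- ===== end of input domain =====

-- ===== PORT A =====
-- B replaces A's two accumulator loops by one filter pass feeding max() (objective: simpler).
def maximotuplas (listatuplas : List (String × Int)) (producto : String) : Int :=
  let valormaximo : Int := 0
  let valormaximo := listatuplas.foldl (fun v ij => if producto == ij.1 then ij.2 else v) valormaximo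
  listatuplas.foldl (fun v ij => if producto == ij.1 then (if ij.2 > v then ij.2 else v) else v) valormaximo

-- ===== PORT B =====
def maximotuplas_alt (listatuplas : List (String × Int)) (producto : String) : Int :=
  let vals := (listatuplas.filter (fun ij => ij.1 == producto)).map Prod.snd
  if vals.isEmpty then 0 else (PySem.List.max? vals (fun x => x)).getD 0

-- ===== PRECONDITION & SPEC =====
def Spec_maximotuplas (listatuplas : List (String × Int)) (producto : String) (out : Int) : Prop := out = maximotuplas_alt listatuplas producto
instance (listatuplas : List (String × Int)) (producto : String) (out : Int) : Decidable (Spec_maximotuplas listatuplas producto out) := by unfold Spec_maximotuplas; infer_instance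

-- ===== CLAIM (what is proved, stated in full; the proofs are below) =====
def Claim_equal_maximotuplas : Prop := ∀ (listatuplas : List (String × Int)) (producto : String), Dom_maximotuplas listatuplas producto → Spec_maximotuplas listatuplas producto (maximotuplas listatuplas producto)

-- ===== LEMMAS AND PROOFS =====

-- ===== VERDICT (by name: the statement is the Claim_ definition above) =====
-- restrict a guarded fold over pairs to the fold over the matching second components
lemma pv_fold_filter (p : String) (f : Int → Int → Int) :
    ∀ (l : List (String × Int)) (a : Int),
      l.foldl (fun v ij => if p == ij.1 then f v ij.2 else v) a
        = ((l.filter (fun ij => ij.1 == p)).map Prod.snd).foldl f a := by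
  intro l
  induction l with
  | nil => intro a; rfl
  | cons hd tl ih =>
    intro a
    rw [List.foldl_cons, List.filter_cons]
    by_cases h : hd.1 = p
    · have h1 : (p == hd.1) = true := by simp [h]
      have h2 : (hd.1 == p) = true := by simp [h]
      simp only [h1, h2, if_true]
      rw [List.map_cons, List.foldl_cons]
      exact ih (f a hd.2)
    · have h1 : (p == hd.1) = false := by simp [Ne.symm h]
      have h2 : (hd.1 == p) = false := by simp [h]
      simp only [h1, h2, Bool.false_eq_true, if_false]
      exact ih a

lemma pv_foldl_max_max (a b : Int) : ∀ (xs : List Int),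
    xs.foldl max (max a b) = max a (xs.foldl max b) := by
  intro xs
  induction xs generalizing b with
  | nil => rfl
  | cons y ys ih => simp [List.foldl, max_assoc, ih]

lemma pv_le_foldl_max (a : Int) (xs : List Int) : a ≤ xs.foldl max a := by
  induction xs generalizing a with
  | nil => simp
  | cons y ys ih => exact le_trans (le_max_left a y) (ih (max a y))

lemma pv_mem_le_foldl_max (s : Int) : ∀ (xs : List Int) (a : Int), s ∈ xs → s ≤ xs.foldl max a := by
  intro xs
  induction xs with
  | nil => intro a h; cases h
  | cons y ys ih =>
    intro a h
    rcases List.mem_cons.mp h with h | h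
    · subst h; exact le_trans (le_max_right a s) (pv_le_foldl_max _ _)
    · exact ih _ h

lemma pv_last_fold_mem : ∀ (xs : List Int) (a : Int), xs.foldl (fun _ j => j) a = a ∨ xs.foldl (fun _ j => j) a ∈ xs := by
  intro xs
  induction xs with
  | nil => intro a; left; rfl
  | cons y ys ih =>
    intro a
    rcases ih y with h | h
    · right; simp [List.foldl, h]
    · right; simp [List.foldl]; right; exact h

lemma pv_core : ∀ (vals : List Int),
    vals.foldl (fun v j => if j > v then j else v) (vals.foldl (fun _ j => j) 0)
      = (if vals.isEmpty then 0 else (PySem.List.max? vals (fun x => x)).getD 0) := by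
  intro vals
  have hmax : (fun v j : Int => if j > v then j else v) = max := by
    funext v j
    simp only [max_def]
    split_ifs <;> omega
  rw [hmax]
  cases vals with
  | nil => rfl
  | cons x xs =>
    simp only [List.isEmpty_cons, if_neg (by decide : ¬false = true),
      PySem.List.max?_id_cons, Option.getD_some]
    show (x :: xs).foldl max (xs.foldl (fun _ j => j) x) = xs.foldl max x
    set s := xs.foldl (fun _ j => j) x with hs
    have hsmem : s = x ∨ s ∈ xs := pv_last_fold_mem xs x
    simp only [List.foldl_cons]
    have hle : s ≤ xs.foldl max x := by
      rcases hsmem with h | h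
      · rw [h]; exact pv_le_foldl_max _ _
      · exact pv_mem_le_foldl_max _ _ _ h
    calc xs.foldl max (max s x) = max s (xs.foldl max x) := pv_foldl_max_max s x xs
    _ = xs.foldl max x := max_eq_right hle

theorem maximotuplas_spec : Claim_equal_maximotuplas := by
  intro l p _
  unfold Spec_maximotuplas maximotuplas maximotuplas_alt
  simp only []
  rw [pv_fold_filter p (fun v j => j) l 0,
      pv_fold_filter p (fun v j => if j > v then j else v) l]
  exact pv_core _
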